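-- pv_equiv track=rewrite | github.com/GoshaZyablikov/SumDay | SumDays.py | month_digit_sums
-- ===== SOURCE A (Python) =====
-- def digit_sum(n):
--     return sum(int(d) for d in str(n))
--
-- days_in_month = [31, 28, 31, 30, 31, 30, 31, 31, 30, 31, 30, 31]
--
-- def month_digit_sums(year):
--     if year % 4 == 0:
--         days_in_month[1] = 29
--     else:
--         days_in_month[1] = 28
--     month_sums = [0] * 12
--     for month, days in enumerate(days_in_month):
--         for day in range(1, days + 1):
--             month_sums[month] += digit_sum(day)
--     return month_sums
-- ===== SOURCE B (Python) =====
-- def digit_sum(n):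
--     return sum(int(d) for d in str(n))
--
-- days_in_month = [31, 28, 31, 30, 31, 30, 31, 31, 30, 31, 30, 31]
--
-- def month_digit_sums(year):
--     days_in_month[1] = 29 if year % 4 == 0 else 28
--     cum = [0]
--     for d in range(1, 32):
--         cum.append(cum[-1] + digit_sum(d))
--     return [cum[days] for days in days_in_month]
-- ===== Notes on version B (the rewrite author's own statement) =====
-- stated objective: simpler
-- what changed: Replaces the per-month re-scan of day digit-sums with one cumulative prefix table cum[0..31] built in a single pass, then each month is a table lookup cum[days].
import Mathlib
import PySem

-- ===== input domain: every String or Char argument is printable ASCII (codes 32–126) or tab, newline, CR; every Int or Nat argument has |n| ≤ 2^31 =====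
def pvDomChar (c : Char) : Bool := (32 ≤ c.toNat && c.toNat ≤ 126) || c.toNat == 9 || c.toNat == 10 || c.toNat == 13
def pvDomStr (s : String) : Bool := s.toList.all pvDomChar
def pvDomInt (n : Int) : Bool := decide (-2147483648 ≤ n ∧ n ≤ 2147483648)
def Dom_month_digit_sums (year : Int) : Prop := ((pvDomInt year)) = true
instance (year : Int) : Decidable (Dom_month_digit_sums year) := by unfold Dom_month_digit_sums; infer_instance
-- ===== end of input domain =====

-- ===== PORT A =====
-- B replaces A's per-month inner scans by one cumulative prefix table; equivalence is about the
-- RETURN value only (both Pythons mutate the global days_in_month[1] identically).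
-- digit_sum(n) = sum(int(d) for d in str(n)); the .getD 0 default is never hit on the positive days used
def digitSum (n : Int) : Int :=
  ((PySem.Int.toStr n).toList.map (fun c => (PySem.Int.ofStr? (String.mk [c])).getD 0)).sum

def month_digit_sums (year : Int) : List Int :=
  let dim : List Int := [31, if PySem.Int.mod year 4 = 0 then 29 else 28, 31, 30, 31, 30, 31, 31, 30, 31, 30, 31]
  dim.map (fun days => (PySem.List.pyRange 1 (days+1) 1).foldl (fun acc day => acc + digitSum day) 0)

-- ===== PORT B =====
def month_digit_sums_alt (year : Int) : List Int :=
  let dim : List Int := [31, if PySem.Int.mod year 4 = 0 then 29 else 28, 31, 30, 31, 30, 31, 31, 30, 31, 30, 31]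
  let cum := (PySem.List.pyRange 1 32 1).foldl
    (fun c d => c ++ [((PySem.List.pyGet? c (-1)).getD 0) + digitSum d]) ([0] : List Int)
  dim.map (fun days => (PySem.List.pyGet? cum days).getD 0)
-- ===== PRECONDITION & SPEC =====
def Spec_month_digit_sums (year : Int) (out : List Int) : Prop := out = month_digit_sums_alt year
instance (year : Int) (out : List Int) : Decidable (Spec_month_digit_sums year out) := by unfold Spec_month_digit_sums; infer_instance

-- ===== CLAIM (what is proved, stated in full; the proofs are below) =====
def Claim_equal_month_digit_sums : Prop := ∀ (year : Int), Dom_month_digit_sums year → Spec_month_digit_sums year (month_digit_sums year)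

-- ===== LEMMAS AND PROOFS =====

-- ===== VERDICT (by name: the statement is the Claim_ definition above) =====
theorem month_digit_sums_spec : Claim_equal_month_digit_sums := by
  intro year _
  unfold Spec_month_digit_sums month_digit_sums month_digit_sums_alt
  by_cases h : PySem.Int.mod year 4 = 0
  · simp only [if_pos h]; decide
  · simp only [if_neg h]; decide
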